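-- pv_equiv track=rewrite | github.com/syn-ce/advent-of-code-2024 | 4/main.py | count_crosses
-- ===== SOURCE A (Python) =====
-- def count_crosses(board: list[list[str]], row: int, col: int, word: str, idx: int, xdir: int, ydir: int,
--                   xmas_positions: set[(int, int)]) -> int:
--     if row < 0 or row >= len(board) or col < 0 or col >= len(board[row]) or board[row][col] != word[idx]:
--         return 0
--
--     if idx == len(word) - 1:
--         # Store cross at middle letter of the word
--         # For 'MAS' (a 3-letter word), we will look 1=3//2 letter back from the end (i.e., look at 'A')
--         middle_pos = (row - xdir * (len(word) // 2), col - ydir * (len(word) // 2))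
--         if middle_pos in xmas_positions:  # Found second 'MAS' for this position -> must form cross
--             return 1
--         xmas_positions.add(middle_pos)
--         return 0
--
--     if not (xdir == 0 and ydir == 0):  # Only check one direction
--         return count_crosses(board, row + xdir, col + ydir, word, idx + 1, xdir, ydir, xmas_positions)
--
--     crosses = 0
--     for i in [-1, 1]:  # Check diagonals
--         for j in [-1, 1]:
--             if i == 0 and j == 0:
--                 continue
--             crosses += count_crosses(board, row + i, col + j, word, idx + 1, i, j, xmas_positions)
--     return crosses
-- ===== SOURCE B (Python) =====
-- # Same result as A; replaces the self-recursive diagonal walk with an explicit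
-- # iterative walker and drives the four diagonals from a flat loop over direction
-- # pairs.  Performs the same in-place mutations of xmas_positions as A.
-- def count_crosses(board: list[list[str]], row: int, col: int, word: str, idx: int, xdir: int, ydir: int,
--                   xmas_positions: set) -> int:
--     if xdir != 0 or ydir != 0:
--         return _walk(board, word, row, col, idx, xdir, ydir, xmas_positions)
--     if row < 0 or row >= len(board) or col < 0 or col >= len(board[row]) or board[row][col] != word[idx]:
--         return 0
--     if idx == len(word) - 1:
--         mid = (row, col)
--         if mid in xmas_positions:
--             return 1
--         xmas_positions.add(mid)
--         return 0
--     total = 0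
--     for dx, dy in ((-1, -1), (-1, 1), (1, -1), (1, 1)):
--         total += _walk(board, word, row + dx, col + dy, idx + 1, dx, dy, xmas_positions)
--     return total
--
--
-- def _walk(board, word, r, c, k, dx, dy, positions):
--     n = len(word)
--     for i in range(k, n - 1):
--         if r < 0 or r >= len(board) or c < 0 or c >= len(board[r]) or board[r][c] != word[i]:
--             return 0
--         r += dx
--         c += dy
--     if r < 0 or r >= len(board) or c < 0 or c >= len(board[r]) or board[r][c] != word[n - 1]:
--         return 0
--     mid = (r - dx * (n // 2), c - dy * (n // 2))
--     if mid in positions: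
--         return 1
--     positions.add(mid)
--     return 0
-- ===== Notes on version B (the rewrite author's own statement) =====
-- stated objective: simpler
-- what changed: Replaces A's self-recursive walk along a diagonal with an explicit iterative walker (a for-loop over the remaining word indices) and drives the four diagonals from a flat loop over direction pairs instead of re-entering the recursive dispatcher; set queries/mutations happen in the same order.
import Mathlib
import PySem

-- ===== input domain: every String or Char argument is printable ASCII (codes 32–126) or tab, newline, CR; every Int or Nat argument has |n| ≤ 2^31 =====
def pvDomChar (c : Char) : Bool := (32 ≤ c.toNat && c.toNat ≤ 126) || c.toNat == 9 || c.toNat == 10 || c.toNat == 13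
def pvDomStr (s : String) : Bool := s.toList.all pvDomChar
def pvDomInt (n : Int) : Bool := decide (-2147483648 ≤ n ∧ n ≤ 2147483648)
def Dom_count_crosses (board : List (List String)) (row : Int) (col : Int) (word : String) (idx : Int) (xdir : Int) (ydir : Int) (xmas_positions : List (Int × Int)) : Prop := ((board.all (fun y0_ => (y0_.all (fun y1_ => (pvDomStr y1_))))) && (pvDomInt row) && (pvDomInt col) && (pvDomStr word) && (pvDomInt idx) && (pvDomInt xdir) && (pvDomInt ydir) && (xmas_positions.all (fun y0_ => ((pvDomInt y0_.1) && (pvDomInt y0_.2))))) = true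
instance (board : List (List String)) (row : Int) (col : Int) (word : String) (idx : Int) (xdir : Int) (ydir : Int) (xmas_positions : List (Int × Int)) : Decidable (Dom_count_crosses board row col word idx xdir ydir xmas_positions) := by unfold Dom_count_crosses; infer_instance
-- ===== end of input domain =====

-- B replaces A's self-recursive diagonal walk by an explicit iterative walker plus a flat loop
-- over the four diagonal direction pairs (objective: simpler).  A mutates xmas_positions in
-- place; the equivalence proved here is about the RETURN value (B performs the same mutations).

-- ===== PORT A =====
-- A's recursion is ported with a fuel counter that only makes it total; within Pre_ the fuel
-- passed at top level is always sufficient.  The `none` case of word[idx] is where Python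
-- raises IndexError (excluded by Pre_).
def crossAux (board : List (List String)) (word : String) :
    Nat → Int → Int → Int → Int → Int → PySem.Set (Int × Int) → Int × PySem.Set (Int × Int)
  | 0, _, _, _, _, _, s => (0, s)
  | f+1, row, col, idx, xdir, ydir, s =>
    if row < 0 ∨ (board.length : Int) ≤ row then (0, s) else
    let brow := board.getD row.toNat []
    if col < 0 ∨ (brow.length : Int) ≤ col then (0, s) else
    match PySem.Str.pyGet? word idx with
    | none => (0, s)  -- Python raises IndexError here
    | some ch =>
      if (brow.getD col.toNat "").toList ≠ [ch] then (0, s) else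
      if idx = (word.toList.length : Int) - 1 then
        let mid := (row - xdir * ((word.toList.length / 2 : Nat) : Int),
                    col - ydir * ((word.toList.length / 2 : Nat) : Int))
        if PySem.Set.contains s mid then (1, s) else (0, PySem.Set.add s mid)
      else if ¬ (xdir = 0 ∧ ydir = 0) then
        crossAux board word f (row + xdir) (col + ydir) (idx + 1) xdir ydir s
      else
        [(-1 : Int), 1].foldl (fun acc i =>
          [(-1 : Int), 1].foldl (fun acc2 j =>
            if i = 0 ∧ j = 0 then acc2
            else
              let r := crossAux board word f (row + i) (col + j) (idx + 1) i j acc2.2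
              (acc2.1 + r.1, r.2)) acc) (0, s)

def count_crosses (board : List (List String)) (row : Int) (col : Int) (word : String) (idx : Int) (xdir : Int) (ydir : Int) (xmas_positions : List (Int × Int)) : Int :=
  (crossAux board word (((word.toList.length : Int) - idx).toNat + 1) row col idx xdir ydir xmas_positions).1

-- ===== PORT B =====
-- B's `for i in range(k, n-1)` loop, ported with the iteration count (n-1-k).toNat as the
-- structural argument; the 0 case is the code after the loop (final-cell check + middle logic).
def walkAlt (board : List (List String)) (word : String) (xdir ydir : Int) :
    Nat → Int → Int → Int → PySem.Set (Int × Int) → Int × PySem.Set (Int × Int)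
  | 0, r, c, _, s =>
    if r < 0 ∨ (board.length : Int) ≤ r then (0, s) else
    let brow := board.getD r.toNat []
    if c < 0 ∨ (brow.length : Int) ≤ c then (0, s) else
    match PySem.Str.pyGet? word ((word.toList.length : Int) - 1) with
    | none => (0, s)  -- Python raises IndexError here
    | some ch =>
      if (brow.getD c.toNat "").toList ≠ [ch] then (0, s) else
      let mid := (r - xdir * ((word.toList.length / 2 : Nat) : Int),
                  c - ydir * ((word.toList.length / 2 : Nat) : Int))
      if PySem.Set.contains s mid then (1, s) else (0, PySem.Set.add s mid)
  | steps+1, r, c, i, s =>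
    if r < 0 ∨ (board.length : Int) ≤ r then (0, s) else
    let brow := board.getD r.toNat []
    if c < 0 ∨ (brow.length : Int) ≤ c then (0, s) else
    match PySem.Str.pyGet? word i with
    | none => (0, s)  -- Python raises IndexError here
    | some ch =>
      if (brow.getD c.toNat "").toList ≠ [ch] then (0, s) else
      walkAlt board word xdir ydir steps (r + xdir) (c + ydir) (i + 1) s

def count_crosses_alt (board : List (List String)) (row : Int) (col : Int) (word : String) (idx : Int) (xdir : Int) (ydir : Int) (xmas_positions : List (Int × Int)) : Int :=
  if xdir ≠ 0 ∨ ydir ≠ 0 then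
    (walkAlt board word xdir ydir ((word.toList.length : Int) - 1 - idx).toNat row col idx xmas_positions).1
  else
    if row < 0 ∨ (board.length : Int) ≤ row then 0 else
    let brow := board.getD row.toNat []
    if col < 0 ∨ (brow.length : Int) ≤ col then 0 else
    match PySem.Str.pyGet? word idx with
    | none => 0  -- Python raises IndexError here
    | some ch =>
      if (brow.getD col.toNat "").toList ≠ [ch] then 0 else
      if idx = (word.toList.length : Int) - 1 then
        if PySem.Set.contains xmas_positions (row, col) then 1 else 0
      else
        (([(-1, -1), (-1, 1), (1, -1), (1, 1)] : List (Int × Int)).foldl (fun acc d =>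
          let r := walkAlt board word d.1 d.2 ((word.toList.length : Int) - 1 - (idx + 1)).toNat
                     (row + d.1) (col + d.2) (idx + 1) acc.2
          (acc.1 + r.1, r.2)) (0, xmas_positions)).1

-- ===== PRECONDITION & SPEC =====
-- Pre_ excludes exactly the inputs where Python A raises IndexError: a start cell on the board
-- together with an index idx outside [-len(word), len(word)-1] (word[idx] is evaluated there).
def Pre_count_crosses (board : List (List String)) (row : Int) (col : Int) (word : String) (idx : Int) (xdir : Int) (ydir : Int) (xmas_positions : List (Int × Int)) : Prop :=
  (row < 0 ∨ (board.length : Int) ≤ row ∨ col < 0 ∨ ((board.getD row.toNat []).length : Int) ≤ col)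
  ∨ (-(word.toList.length : Int) ≤ idx ∧ idx ≤ (word.toList.length : Int) - 1)
instance (board : List (List String)) (row : Int) (col : Int) (word : String) (idx : Int) (xdir : Int) (ydir : Int) (xmas_positions : List (Int × Int)) : Decidable (Pre_count_crosses board row col word idx xdir ydir xmas_positions) := by unfold Pre_count_crosses; infer_instance

def pvWitness_count_crosses : List (List String) × Int × Int × String × Int × Int × Int × (List (Int × Int)) :=
  ([["M", "X"], ["X", "A"], ["S", "X"]], 0, 0, "MAS", 0, 0, 0, [(1, 1)])

def Spec_count_crosses (board : List (List String)) (row : Int) (col : Int) (word : String) (idx : Int) (xdir : Int) (ydir : Int) (xmas_positions : List (Int × Int)) (out : Int) : Prop := out = count_crosses_alt board row col word idx xdir ydir xmas_positions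
instance (board : List (List String)) (row : Int) (col : Int) (word : String) (idx : Int) (xdir : Int) (ydir : Int) (xmas_positions : List (Int × Int)) (out : Int) : Decidable (Spec_count_crosses board row col word idx xdir ydir xmas_positions out) := by unfold Spec_count_crosses; infer_instance

-- ===== CLAIM (what is proved, stated in full; the proofs are below) =====
def Claim_equal_count_crosses : Prop := ∀ (board : List (List String)) (row : Int) (col : Int) (word : String) (idx : Int) (xdir : Int) (ydir : Int) (xmas_positions : List (Int × Int)), Dom_count_crosses board row col word idx xdir ydir xmas_positions → Pre_count_crosses board row col word idx xdir ydir xmas_positions → Spec_count_crosses board row col word idx xdir ydir xmas_positions (count_crosses board row col word idx xdir ydir xmas_positions)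

-- ===== LEMMAS AND PROOFS =====

-- An out-of-board start makes the walker return (0, s) whatever the step count.
theorem walkAlt_oob (board : List (List String)) (word : String) (xdir ydir : Int)
    (steps : Nat) (r c i : Int) (s : PySem.Set (Int × Int))
    (h : r < 0 ∨ (board.length : Int) ≤ r ∨ c < 0 ∨ ((board.getD r.toNat []).length : Int) ≤ c) :
    walkAlt board word xdir ydir steps r c i s = (0, s) := by
  simp only [List.getD_eq_getElem?_getD] at h
  rcases h with h | h | h | h <;> cases steps <;> simp [walkAlt, h]

-- In a nonzero direction, A's recursion and B's walker agree step for step.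
theorem crossAux_eq_walkAlt (board : List (List String)) (word : String) (xdir ydir : Int)
    (hdir : ¬ (xdir = 0 ∧ ydir = 0)) :
    ∀ (f : Nat) (row col k : Int) (s : PySem.Set (Int × Int)),
      k ≤ (word.toList.length : Int) - 1 →
      ((word.toList.length : Int) - 1 - k).toNat < f →
      crossAux board word f row col k xdir ydir s
        = walkAlt board word xdir ydir ((word.toList.length : Int) - 1 - k).toNat row col k s := by
  intro f
  induction f with
  | zero => intro row col k s _ hf; omega
  | succ f ih =>
    intro row col k s hk hf
    rcases lt_or_eq_of_le hk with hlt | heq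
    · -- k < n - 1 : one loop step on each side
      have hsteps : ((word.toList.length : Int) - 1 - k).toNat
          = ((word.toList.length : Int) - 1 - (k + 1)).toNat + 1 := by omega
      rw [hsteps]
      simp only [crossAux, walkAlt]
      split
      · rfl
      · split
        · rfl
        · cases hw : PySem.Str.pyGet? word k with
          | none => rfl
          | some ch =>
            split
            · rfl
            · have hne : ¬ k = (word.toList.length : Int) - 1 := by omega
              simp only [hne, if_false, ite_not]
              rw [ih (row + xdir) (col + ydir) (k + 1) s (by omega) (by omega)]
    · -- k = n - 1 : A's middle-position case against B's post-loop code
      have hsteps : ((word.toList.length : Int) - 1 - k).toNat = 0 := by omega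
      rw [hsteps]
      simp only [crossAux, walkAlt]
      split
      · rfl
      · split
        · rfl
        · rw [← heq]

theorem pyGet?_some_lt (xs : List Char) (i : Int) (ch : Char)
    (h : PySem.List.pyGet? xs i = some ch) : i < (xs.length : Int) := by
  by_contra hc
  rw [(PySem.List.pyGet?_eq_none_iff xs i).2 (by simp [PySem.Raise.InRange]; omega)] at h
  simp at h

theorem count_crosses_spec_aux (board : List (List String)) (row : Int) (col : Int)
    (word : String) (idx : Int) (xdir : Int) (ydir : Int) (xmas_positions : List (Int × Int))
    (hpre : Pre_count_crosses board row col word idx xdir ydir xmas_positions) :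
    count_crosses board row col word idx xdir ydir xmas_positions
      = count_crosses_alt board row col word idx xdir ydir xmas_positions := by
  unfold count_crosses count_crosses_alt
  by_cases hdir : xdir = 0 ∧ ydir = 0
  · -- zero direction: unfold one step of A and compare with B's dispatch branch
    obtain ⟨hx, hy⟩ := hdir
    subst hx; subst hy
    have hne : ¬ ((0 : Int) ≠ 0 ∨ (0 : Int) ≠ 0) := by simp
    rw [if_neg hne]
    simp only [crossAux]
    split
    · rfl
    · split
      · rfl
      · cases hw : PySem.Str.pyGet? word idx with
        | none => rfl
        | some ch =>
          split
          · rfl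
          · have hw' : PySem.List.pyGet? word.toList idx = some ch := by
              simpa using hw
            have hidx_lt : idx < (word.toList.length : Int) :=
              pyGet?_some_lt word.toList idx ch hw'
            by_cases hlast : idx = (word.toList.length : Int) - 1
            · rw [if_pos hlast, if_pos hlast]
              have hz : ∀ a : Int, a - 0 * ((word.toList.length / 2 : Nat) : Int) = a := by
                intro a; ring
              rw [hz row, hz col]
              split
              · rfl
              · split <;> rfl
            · rw [if_neg hlast, if_neg hlast]
              split
              · rfl
              · -- both fans are four sequenced calls; rewrite each with crossAux_eq_walkAlt
                have key : ∀ (dx dy r c : Int) (s : PySem.Set (Int × Int)), ¬ (dx = 0 ∧ dy = 0) →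
                    crossAux board word (((word.length : Int) - idx).toNat) r c (idx + 1) dx dy s
                      = walkAlt board word dx dy ((word.length : Int) - 1 - (idx + 1)).toNat r c (idx + 1) s := by
                  intro dx dy r c s hd
                  have hlen : (word.length : Int) = (word.toList.length : Int) := by simp
                  rw [hlen]
                  exact crossAux_eq_walkAlt board word dx dy hd _ r c (idx + 1) s (by omega) (by omega)
                simp only [List.foldl]
                norm_num
                rw [key (-1) (-1) _ _ _ (by norm_num), key (-1) 1 _ _ _ (by norm_num),
                    key 1 (-1) _ _ _ (by norm_num), key 1 1 _ _ _ (by norm_num)]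
  · -- nonzero direction
    have hd : (xdir ≠ 0 ∨ ydir ≠ 0) := by tauto
    rw [if_pos hd]
    rcases hpre with hoob | ⟨hlo, hhi⟩
    · -- out of the board: both sides are 0 immediately
      rw [walkAlt_oob board word xdir ydir _ row col idx xmas_positions hoob]
      have : (((word.toList.length : Int) - idx).toNat + 1) ≠ 0 := by omega
      cases hf : (((word.toList.length : Int) - idx).toNat + 1) with
      | zero => omega
      | succ f =>
        simp only [crossAux]
        simp only [List.getD_eq_getElem?_getD] at hoob
        rcases hoob with h | h | h | h <;> simp [h]
    · rw [crossAux_eq_walkAlt board word xdir ydir hdir _ row col idx xmas_positions hhi (by omega)]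

-- ===== VERDICT (by name: the statement is the Claim_ definition above) =====
theorem count_crosses_spec : Claim_equal_count_crosses := by
  intro board row col word idx xdir ydir xmas_positions _ hpre
  unfold Spec_count_crosses
  exact count_crosses_spec_aux board row col word idx xdir ydir xmas_positions hpre
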